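-- pv_equiv track=rewrite | github.com/LiME-org/py-rt-model-inference | src/rt_model_inference/iterators.py | obatched
-- ===== SOURCE A (Python) =====
-- from collections.abc import Iterable, Iterator, Sequence
-- from typing import TypeVar
--
-- T = TypeVar("T")
--
-- def obatched(
--     it: Iterable[T], batch_size: int, overlap: int = 1
-- ) -> Iterable[tuple[T, ...]]:
--     """Similarly to `batched` from the `itertools` module,
--     expose a given iterator as a sequence of batches, but do so with a configurable
--     amount of overlap among consecutive batches."""
--
--     if not (0 <= overlap < batch_size):
--         raise ValueError(f"infeasible batch size {batch_size} with overlap {overlap}")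
--
--     batch: list[T] = []
--     only_overlap = True
--     for x in it:
--         batch.append(x)
--         only_overlap = False
--         if len(batch) == batch_size:
--             yield tuple(batch)
--             batch = batch[-overlap:] if overlap > 0 else []
--             only_overlap = True
--
--     if not only_overlap:
--         yield tuple(batch)
-- ===== SOURCE B (Python) =====
-- from itertools import islice
--
--
-- def obatched(it, batch_size, overlap=1):
--     if not (0 <= overlap < batch_size):
--         raise ValueError(f"infeasible batch size {batch_size} with overlap {overlap}")
--     it = iter(it)
--     window = tuple(islice(it, batch_size))
--     if not window:
--         return
--     yield window
--     while True:
--         new = list(islice(it, batch_size - overlap))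
--         if not new:
--             return
--         window = tuple((list(window)[-overlap:] if overlap > 0 else []) + new)
--         yield window
-- ===== Notes on version B (the rewrite author's own statement) =====
-- stated objective: alternative
-- what changed: B is a generator that reads fixed-size strides with itertools.islice (first a full window, then batch_size-overlap new items per step) and slides the window by slicing, instead of A's element-at-a-time append with a length check and an only_overlap flag.
import Mathlib
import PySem

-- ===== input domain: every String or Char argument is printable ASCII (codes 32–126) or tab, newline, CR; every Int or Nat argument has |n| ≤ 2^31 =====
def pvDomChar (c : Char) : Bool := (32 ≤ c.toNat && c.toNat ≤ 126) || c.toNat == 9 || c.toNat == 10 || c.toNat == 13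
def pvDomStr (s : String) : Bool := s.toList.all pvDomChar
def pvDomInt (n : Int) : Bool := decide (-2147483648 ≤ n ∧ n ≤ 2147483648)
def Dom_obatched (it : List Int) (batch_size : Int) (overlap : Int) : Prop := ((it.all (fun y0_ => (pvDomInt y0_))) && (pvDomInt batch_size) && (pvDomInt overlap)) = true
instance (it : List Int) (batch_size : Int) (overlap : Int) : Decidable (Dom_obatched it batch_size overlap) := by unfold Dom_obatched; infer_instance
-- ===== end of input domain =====

-- B reads fixed-size strides (islice) instead of appending elements one at a time with a flag; objective: alternative decomposition, same cost.

-- ===== PORT A =====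
-- the `raise ValueError` branch for ¬(0 ≤ overlap < batch_size) is excluded by Pre_obatched
def obatched (it : List Int) (batch_size : Int) (overlap : Int) : List (List Int) :=
  let st := it.foldl (fun (st : List (List Int) × List Int × Bool) x =>
    let batch := st.2.1 ++ [x]
    if (batch.length : Int) = batch_size then
      (st.1 ++ [batch],
       (if overlap > 0 then PySem.List.slice batch (some (-overlap)) none else []),
       true)
    else (st.1, batch, false)) ([], [], true)
  if st.2.2 = false then st.1 ++ [st.2.1] else st.1

-- ===== PORT B =====
-- the while-loop: new = list(islice(it, batch_size - overlap)); stop if empty; else slide the window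
def obAltLoop (batch_size overlap : Int) (window rest : List Int) : List (List Int) :=
  let new := rest.take (batch_size - overlap).toNat
  if h : new = [] then []
  else
    let window' := (if overlap > 0 then PySem.List.slice window (some (-overlap)) none else []) ++ new
    window' :: obAltLoop batch_size overlap window' (rest.drop (batch_size - overlap).toNat)
termination_by rest.length
decreasing_by
  have h1 : rest ≠ [] := by
    intro he; apply h; simp [new, he]
  have h2 : (batch_size - overlap).toNat ≠ 0 := by
    intro he; apply h; simp [new, he]
  have h3 : 0 < rest.length := List.length_pos_of_ne_nil h1
  simp only [List.length_drop]
  omega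

-- the `raise ValueError` branch for ¬(0 ≤ overlap < batch_size) is excluded by Pre_obatched
def obatched_alt (it : List Int) (batch_size : Int) (overlap : Int) : List (List Int) :=
  let window := it.take batch_size.toNat
  if window = [] then []
  else window :: obAltLoop batch_size overlap window (it.drop batch_size.toNat)

-- ===== PRECONDITION & SPEC =====
-- Pre_ excludes exactly the inputs where A (and B alike) raises ValueError: overlap out of [0, batch_size)
def Pre_obatched (it : List Int) (batch_size : Int) (overlap : Int) : Prop :=
  0 ≤ overlap ∧ overlap < batch_size
instance (it : List Int) (batch_size : Int) (overlap : Int) : Decidable (Pre_obatched it batch_size overlap) := by unfold Pre_obatched; infer_instance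

def pvWitness_obatched : List Int × Int × Int := ([1, 2, 3, 4, 5], 3, 1)

def Spec_obatched (it : List Int) (batch_size : Int) (overlap : Int) (out : List (List Int)) : Prop := out = obatched_alt it batch_size overlap
instance (it : List Int) (batch_size : Int) (overlap : Int) (out : List (List Int)) : Decidable (Spec_obatched it batch_size overlap out) := by unfold Spec_obatched; infer_instance

-- ===== CLAIM (what is proved, stated in full; the proofs are below) =====
def Claim_equal_obatched : Prop := ∀ (it : List Int) (batch_size : Int) (overlap : Int), Dom_obatched it batch_size overlap → Pre_obatched it batch_size overlap → Spec_obatched it batch_size overlap (obatched it batch_size overlap)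

-- ===== LEMMAS AND PROOFS =====

-- the sliding-tail expression both Pythons write as `batch[-overlap:] if overlap > 0 else []`
def tailOv (ov : Int) (b : List Int) : List Int :=
  if ov > 0 then PySem.List.slice b (some (-ov)) none else []

-- A's fold step
def aStep (bs ov : Int) (st : List (List Int) × List Int × Bool) (x : Int) :
    List (List Int) × List Int × Bool :=
  let batch := st.2.1 ++ [x]
  if (batch.length : Int) = bs then
    (st.1 ++ [batch], tailOv ov batch, true)
  else (st.1, batch, false)

-- A's remaining output from a mid-loop state, as a structural recursion
def gA (bs ov : Int) : List Int → List Int → Bool → List (List Int)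
  | [], batch, onlyOv => if onlyOv = false then [batch] else []
  | x :: l, batch, _ =>
    let b := batch ++ [x]
    if (b.length : Int) = bs then
      b :: gA bs ov l (tailOv ov b) true
    else gA bs ov l b false

theorem foldl_aStep_shift (bs ov : Int) (l : List Int) (out : List (List Int))
    (batch : List Int) (o : Bool) :
    l.foldl (aStep bs ov) (out, batch, o)
      = (out ++ (l.foldl (aStep bs ov) ([], batch, o)).1,
         (l.foldl (aStep bs ov) ([], batch, o)).2) := by
  induction l generalizing out batch o with
  | nil => simp
  | cons x l ih =>
    simp only [List.foldl_cons]
    rw [ih, aStep, aStep]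
    simp only
    split
    · rw [ih (([] : List (List Int)) ++ [batch ++ [x]])]
      simp
    · simp

theorem gA_eq_fold (bs ov : Int) (l : List Int) (batch : List Int) (o : Bool) :
    (let st := l.foldl (aStep bs ov) ([], batch, o)
     if st.2.2 = false then st.1 ++ [st.2.1] else st.1) = gA bs ov l batch o := by
  induction l generalizing batch o with
  | nil => cases o <;> simp [gA]
  | cons x l ih =>
    simp only [List.foldl_cons, aStep, gA]
    split
    · rw [foldl_aStep_shift]
      simp only
      rw [← ih (tailOv ov (batch ++ [x])) true]
      simp only
      split <;> simp
    · exact ih (batch ++ [x]) false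

-- the recursive case of gA ignores the flag
theorem gA_flag (bs ov : Int) (l : List Int) (batch : List Int) (hl : l ≠ []) :
    gA bs ov l batch true = gA bs ov l batch false := by
  cases l with
  | nil => exact absurd rfl hl
  | cons x l => simp [gA]

-- consuming one chunk of m = bs - batch.length fresh elements, flag false
theorem gA_chunk (bs ov : Int) (l : List Int) (batch : List Int) (m : Nat)
    (hm : 1 ≤ m) (hlen : batch.length + m = bs.toNat) (hbs : 0 < bs) :
    gA bs ov l batch false =
      if l.length < m then [batch ++ l]
      else (batch ++ l.take m)
            :: gA bs ov (l.drop m) (tailOv ov (batch ++ l.take m)) true := by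
  induction l generalizing batch m with
  | nil =>
    simp [gA]
  | cons x l ih =>
    simp only [gA]
    by_cases hone : m = 1
    · subst hone
      have : ((batch ++ [x]).length : Int) = bs := by
        simp only [List.length_append, List.length_cons, List.length_nil]
        omega
      rw [if_pos this]
      simp
    · have hne : ¬ ((batch ++ [x]).length : Int) = bs := by
        simp only [List.length_append, List.length_cons, List.length_nil]
        omega
      rw [if_neg hne]
      rw [ih (batch ++ [x]) (m - 1) (by omega) (by simp; omega)]
      have hm2 : 2 ≤ m := by omega
      have htk : (x :: l).take m = x :: l.take (m - 1) := by
        cases m with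
        | zero => omega
        | succ k => simp
      have hdr : (x :: l).drop m = l.drop (m - 1) := by
        cases m with
        | zero => omega
        | succ k => simp
      rw [htk, hdr]
      simp only [List.length_cons, List.append_assoc, List.cons_append, List.nil_append]
      split <;> split <;> first | rfl | omega

theorem tailOv_length (ov : Int) (w : List Int) (h0 : 0 ≤ ov) (hle : ov.toNat ≤ w.length) :
    (tailOv ov w).length = ov.toNat := by
  unfold tailOv
  split
  · rename_i hpos
    have hc : -ov = -((ov.toNat : Nat) : Int) := by omega
    rw [hc, PySem.List.slice_from_neg_natCast _ _ (by omega)]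
    simp
    omega
  · simp
    omega

theorem tailOv_fold (ov : Int) (x : List Int) :
    (if ov > 0 then PySem.List.slice x (some (-ov)) none else []) = tailOv ov x := rfl

theorem gA_main (bs ov : Int) (h0 : 0 ≤ ov) (hlt : ov < bs) :
    ∀ (n : Nat) (l w : List Int), l.length ≤ n → w.length = bs.toNat →
      gA bs ov l (tailOv ov w) true = obAltLoop bs ov w l := by
  intro n
  induction n with
  | zero =>
    intro l w hln hw
    have hl : l = [] := by
      cases l with
      | nil => rfl
      | cons a t => simp at hln
    subst hl
    rw [obAltLoop]
    simp [gA]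
  | succ n ih =>
    intro l w hln hw
    have hm1 : 1 ≤ (bs - ov).toNat := by omega
    by_cases hl : l = []
    · subst hl
      rw [obAltLoop]
      simp [gA]
    · have htl : (tailOv ov w).length = ov.toNat := tailOv_length ov w h0 (by omega)
      rw [gA_flag _ _ _ _ hl,
          gA_chunk bs ov l (tailOv ov w) ((bs - ov).toNat) hm1 (by rw [htl]; omega) (by omega)]
      rw [obAltLoop]
      have hnew : ¬ (l.take ((bs - ov).toNat) = []) := by
        simp [List.take_eq_nil_iff, hl]
        omega
      simp only [tailOv_fold]
      rw [dif_neg hnew]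
      by_cases hshort : l.length < (bs - ov).toNat
      · rw [if_pos hshort]
        have ht : l.take ((bs - ov).toNat) = l := List.take_of_length_le (by omega)
        have hd : l.drop ((bs - ov).toNat) = [] := List.drop_eq_nil_of_le (by omega)
        rw [ht, hd, obAltLoop]
        simp
      · rw [if_neg hshort]
        have hlen' : (tailOv ov w ++ l.take ((bs - ov).toNat)).length = bs.toNat := by
          simp [htl]
          omega
        have hdl : (l.drop ((bs - ov).toNat)).length ≤ n := by
          have : 0 < l.length := List.length_pos_of_ne_nil hl
          simp only [List.length_drop]
          omega
        rw [ih (l.drop ((bs - ov).toNat)) (tailOv ov w ++ l.take ((bs - ov).toNat)) hdl hlen']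

theorem main_eq (it : List Int) (bs ov : Int) (h0 : 0 ≤ ov) (hlt : ov < bs) :
    obatched it bs ov = obatched_alt it bs ov := by
  have hA : obatched it bs ov = gA bs ov it [] true := by
    rw [← gA_eq_fold]
    rfl
  rw [hA]
  unfold obatched_alt
  by_cases hit : it = []
  · subst hit
    simp [gA]
  · rw [gA_flag _ _ _ _ hit,
        gA_chunk bs ov it [] (bs.toNat) (by omega) (by simp) (by omega)]
    have hwin : ¬ (it.take bs.toNat = []) := by
      simp [List.take_eq_nil_iff, hit]
      omega
    simp only
    rw [if_neg hwin]
    by_cases hshort : it.length < bs.toNat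
    · rw [if_pos hshort]
      have ht : it.take bs.toNat = it := List.take_of_length_le (by omega)
      have hd : it.drop bs.toNat = [] := List.drop_eq_nil_of_le (by omega)
      rw [ht, hd, obAltLoop]
      simp
    · rw [if_neg hshort]
      have hlen' : (it.take bs.toNat).length = bs.toNat := by
        simp
        omega
      rw [List.nil_append,
          gA_main bs ov h0 hlt ((it.drop bs.toNat).length) _ _ (le_refl _) hlen']

-- ===== VERDICT (by name: the statement is the Claim_ definition above) =====
theorem obatched_spec : Claim_equal_obatched := by
  intro it bs ov _ hpre
  unfold Spec_obatched
  exact main_eq it bs ov hpre.1 hpre.2
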